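-- pv_equiv track=rewrite | github.com/sagarbhadra7/python-mini-challenges | code.py | k_distinct
-- ===== SOURCE A (Python) =====
-- def k_distinct(string,k):
--     list1=[]
--     list2=[]
--     for i in range(len(string)):
--         list1.append(string[i].lower())
--     set1=set(list1)
--     list2=list(set1)
--     if(k==len(list2)):
--         return True
--     else:
--         return False
-- ===== SOURCE B (Python) =====
-- def k_distinct(string, k):
--     count = 0
--     prev = None
--     for c in sorted(string.lower()):
--         if c != prev:
--             count += 1
--             prev = c
--     return k == count
-- ===== Notes on version B (the rewrite author's own statement) =====
-- stated objective: alternative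
-- what changed: Replaces the per-index lowering loop plus set-based dedup with lowering the whole string and a sort-then-scan that counts runs of equal characters in the sorted sequence.
import Mathlib
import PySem

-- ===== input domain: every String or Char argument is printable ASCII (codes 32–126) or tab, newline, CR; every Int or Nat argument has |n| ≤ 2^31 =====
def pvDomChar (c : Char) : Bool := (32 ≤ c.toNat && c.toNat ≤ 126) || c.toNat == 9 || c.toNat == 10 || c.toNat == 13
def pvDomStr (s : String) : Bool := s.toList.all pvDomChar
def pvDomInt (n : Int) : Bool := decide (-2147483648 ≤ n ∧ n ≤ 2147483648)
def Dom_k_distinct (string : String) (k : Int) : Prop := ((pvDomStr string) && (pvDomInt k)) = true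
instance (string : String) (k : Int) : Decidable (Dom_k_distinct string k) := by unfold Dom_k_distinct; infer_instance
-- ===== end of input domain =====

-- B replaces the per-index lowering loop + set dedup with sorting the lowered string and counting runs (alternative decomposition, same result).

-- ===== PORT A =====
def k_distinct (string : String) (k : Int) : Bool :=
  let cs := string.toList
  -- for i in range(len(string)): list1.append(string[i].lower())
  let list1 : List Char := (PySem.List.pyRange 0 (PySem.List.len cs)).foldl
      (fun acc i => acc ++ [PySem.Chars.lowerChar (PySem.List.pyGetD cs i ' ')]) []
  let set1 : PySem.Set Char := PySem.Set.ofList list1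
  -- list2 = list(set1): set iteration order is not modelled, but list2 is only used through len(), which is order-independent
  let list2 : List Char := set1
  if k = (list2.length : Int) then true else false

-- ===== PORT B =====
def k_distinct_alt (string : String) (k : Int) : Bool :=
  let s := (PySem.Str.lower string).toList
  let st := (PySem.List.sorted s (fun x => x) false).foldl
      (fun (st : Nat × Option Char) c => if some c ≠ st.2 then (st.1 + 1, some c) else st)
      (0, (none : Option Char))
  decide (k = (st.1 : Int))

-- ===== PRECONDITION & SPEC =====
def Spec_k_distinct (string : String) (k : Int) (out : Bool) : Prop := out = k_distinct_alt string k
instance (string : String) (k : Int) (out : Bool) : Decidable (Spec_k_distinct string k out) := by unfold Spec_k_distinct; infer_instance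

-- ===== CLAIM (what is proved, stated in full; the proofs are below) =====
def Claim_equal_k_distinct : Prop := ∀ (string : String) (k : Int), Dom_k_distinct string k → Spec_k_distinct string k (k_distinct string k)

-- ===== LEMMAS AND PROOFS =====

-- the distinct-count (Set.ofList).length depends only on the membership set
theorem pv_len_ofList_congr {xs ys : List Char} (h : ∀ x, x ∈ xs ↔ x ∈ ys) :
    (PySem.Set.ofList xs).length = (PySem.Set.ofList ys).length := by
  have hp : (PySem.Set.ofList xs).Perm (PySem.Set.ofList ys) := by
    rw [List.perm_ext_iff_of_nodup (PySem.Set.nodup_ofList _) (PySem.Set.nodup_ofList _)]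
    intro a; simp only [PySem.Set.mem_ofList]; exact h a
  exact hp.length_eq

-- the scan step of B, named for the proofs
def pvStep (st : Nat × Option Char) (c : Char) : Nat × Option Char :=
  if some c ≠ st.2 then (st.1 + 1, some c) else st

-- run-count of the tail of a sorted list, relative to the head already counted
theorem pv_scan_tail : ∀ (t : List Char) (c : Char) (n : Nat),
    (c :: t).Pairwise (· ≤ ·) →
    (t.foldl pvStep (n, some c)).1 + 1 = n + (PySem.Set.ofList (c :: t)).length := by
  intro t
  induction t with
  | nil => intro c n _; simp [PySem.Set.ofList, PySem.Set.add]
  | cons d t' ih =>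
    intro c n hp
    rcases List.pairwise_cons.mp hp with ⟨hc, hp'⟩
    rcases List.pairwise_cons.mp hp' with ⟨hd, ht'⟩
    by_cases hdc : d = c
    · subst hdc
      have hstep : pvStep (n, some d) d = (n, some d) := by simp [pvStep]
      have hpw : (d :: t').Pairwise (· ≤ ·) := List.pairwise_cons.mpr ⟨hd, ht'⟩
      have hih := ih d n hpw
      have hlen : (PySem.Set.ofList (d :: d :: t')).length = (PySem.Set.ofList (d :: t')).length := by
        apply pv_len_ofList_congr; intro x; simp only [List.mem_cons]; tauto
      simpa [List.foldl_cons, hstep, hlen] using hih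
    · have hstep : pvStep (n, some c) d = (n + 1, some d) := by
        simp [pvStep, hdc, Ne.symm hdc]
      have hnotmem : c ∉ (d :: t') := by
        intro hm
        rcases List.mem_cons.mp hm with h | h
        · exact hdc h.symm
        · have h1 : c ≤ d := hc d (List.mem_cons_self ..)
          have h2 : d ≤ c := hd c h
          exact hdc (le_antisymm h2 h1)
      have hlen : (PySem.Set.ofList (c :: d :: t')).length = (PySem.Set.ofList (d :: t')).length + 1 := by
        rw [PySem.Set.ofList_cons]
        have hdisc : (PySem.Set.ofList (d :: t')).discard c = PySem.Set.ofList (d :: t') := by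
          unfold PySem.Set.discard
          apply List.filter_eq_self.mpr
          intro a ha
          have : a ∈ (d :: t') := (PySem.Set.mem_ofList _ _).mp ha
          have hne : a ≠ c := fun he => hnotmem (he ▸ this)
          simp [hne]
        rw [hdisc, List.length_cons]
      have hih := ih d (n + 1) hp'
      simp only [List.foldl_cons, hstep]
      omega

-- run-count of a sorted list from the initial state is the number of distinct elements
theorem pv_scan_sorted (l : List Char) (h : l.Pairwise (· ≤ ·)) :
    (l.foldl pvStep (0, (none : Option Char))).1 = (PySem.Set.ofList l).length := by
  cases l with
  | nil => simp [PySem.Set.ofList]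
  | cons c t =>
    have hstep : pvStep (0, (none : Option Char)) c = (1, some c) := by simp [pvStep]
    have := pv_scan_tail t c 1 h
    simp only [List.foldl_cons, hstep]
    omega

theorem k_distinct_eq (string : String) (k : Int) :
    k_distinct string k = k_distinct_alt string k := by
  unfold k_distinct k_distinct_alt
  simp only [PySem.Str.toList_lower, PySem.Chars.lower]
  rw [PySem.List.foldl_pyRange_pyGetD string.toList ' '
        (fun acc x => acc ++ [PySem.Chars.lowerChar x]) [] (le_refl 0)]
  simp only [Int.toNat_zero, List.drop_zero,
    PySem.List.foldl_append_singleton_eq_map, List.nil_append]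
  set m := string.toList.map PySem.Chars.lowerChar with hm
  have hpw : (PySem.List.sorted m (fun x => x) false).Pairwise (· ≤ ·) := by
    simpa using PySem.List.sorted_pairwise m (fun x => x)
  have hscan := pv_scan_sorted _ hpw
  have hlen : (PySem.Set.ofList (PySem.List.sorted m (fun x => x) false)).length
      = (PySem.Set.ofList m).length := by
    apply pv_len_ofList_congr
    intro x; exact PySem.List.mem_sorted m (fun x => x) false x
  have hfold : ((PySem.List.sorted m (fun x => x) false).foldl
      (fun (st : Nat × Option Char) c => if some c ≠ st.2 then (st.1 + 1, some c) else st)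
      (0, (none : Option Char))).1 = (PySem.Set.ofList m).length := by
    have : (fun (st : Nat × Option Char) c => if some c ≠ st.2 then (st.1 + 1, some c) else st)
        = pvStep := by funext st c; rfl
    rw [this, hscan, hlen]
  rw [hfold]
  by_cases hk : k = ((PySem.Set.ofList m).length : Int) <;> simp [hk]

-- ===== VERDICT (by name: the statement is the Claim_ definition above) =====
theorem k_distinct_spec : Claim_equal_k_distinct := by
  intro string k _
  unfold Spec_k_distinct
  exact k_distinct_eq string k
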